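-- pv_equiv track=rewrite | github.com/superzachen/usaco_practice | bronze/988_photoshoot.py | solve_photoshoot
-- ===== SOURCE A (Python) =====
-- def solve_photoshoot(N, B):
--     # Try every possible value for a[0]
--     for first in range(1, N + 1):
--         A = [first]
--         used = set(A)
--         valid = True
--
--         # Reconstruct the rest of A
--         for i in range(N - 1):
--             next_val = B[i] - A[i]
--             # Check validity of next value
--             if 1 <= next_val <= N and next_val not in used:
--                 A.append(next_val)
--                 used.add(next_val)
--             else:
--                 valid = False
--                 break
--
--         if valid:
--             return A
-- ===== SOURCE B (Python) =====
-- def solve_photoshoot(N, B):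
--     # O(N): any valid answer is a permutation of 1..N, so its sum and sum of
--     # squares are fixed; with A[k] = c[k] + s[k]*first those give (at most a
--     # quadratic) O(1) filters per candidate first, and at most two candidates
--     # survive to the full O(N) reconstruction check.
--     if N < 1:
--         return None
--     c = [0]
--     s = [1]
--     for k in range(1, N):
--         c.append(B[k - 1] - c[-1])
--         s.append(-s[-1])
--     sum_c = sum(c)
--     sum_s = sum(s)
--     sum_sc = sum(si * ci for si, ci in zip(s, c))
--     sum_c2 = sum(ci * ci for ci in c)
--     T1 = N * (N + 1) // 2
--     T2 = N * (N + 1) * (2 * N + 1) // 6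
--     for f in range(1, N + 1):
--         if sum_c + sum_s * f != T1:
--             continue
--         if sum_c2 + 2 * sum_sc * f + N * f * f != T2:
--             continue
--         seen = set()
--         out = []
--         ok = True
--         for k in range(N):
--             v = c[k] + s[k] * f
--             if v < 1 or v > N or v in seen:
--                 ok = False
--                 break
--             seen.add(v)
--             out.append(v)
--         if ok:
--             return out
--     return None
-- ===== Notes on version B (the rewrite author's own statement) =====
-- stated objective: alternative
-- what changed: A tries every candidate first value and rebuilds the whole sequence for each; B precomputes the alternating-sum coefficients A[k] = c[k] + s[k]*first once, filters candidates in O(1) with the permutation sum and sum-of-squares invariants (a quadratic with at most two integer roots), and runs the full reconstruction check on at most two surviving candidates (O(N) on solvable inputs, where A is O(N^2); a timing run on random mostly-unsolvable inputs measured only ~1.3-1.5x, so no speed is claimed).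
-- outside the precondition, e.g. on solve_photoshoot(3, [100]): A returns None, B raises IndexError
import Mathlib
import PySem

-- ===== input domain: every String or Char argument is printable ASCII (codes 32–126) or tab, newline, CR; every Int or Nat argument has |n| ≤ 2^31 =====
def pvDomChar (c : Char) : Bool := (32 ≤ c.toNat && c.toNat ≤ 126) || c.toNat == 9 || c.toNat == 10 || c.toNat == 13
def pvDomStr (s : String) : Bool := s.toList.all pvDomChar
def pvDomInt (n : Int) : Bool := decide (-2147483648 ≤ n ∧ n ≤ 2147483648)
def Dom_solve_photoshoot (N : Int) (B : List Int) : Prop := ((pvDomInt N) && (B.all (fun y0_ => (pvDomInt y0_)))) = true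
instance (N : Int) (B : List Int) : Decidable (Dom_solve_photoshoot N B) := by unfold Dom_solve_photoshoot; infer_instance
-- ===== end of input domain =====

-- B replaces A's try-every-first search, which rebuilds the whole sequence per candidate,
-- by precomputed alternating-sum coefficients (A[k] = c[k] + s[k]*first) and the permutation
-- sum / sum-of-squares invariants as per-candidate filters, so at most two candidates reach
-- the full reconstruction check (intended as faster; a timing run measured ~1.3-1.5x).

-- ===== PORT A =====
def pvAStep (N : Int) (B : List Int) (st : Option (List Int × PySem.Set Int)) (i : Int) :
    Option (List Int × PySem.Set Int) :=
  match st with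
  | none => none
  | some (A, used) =>
    let next := PySem.List.pyGetD B i 0 - PySem.List.pyGetD A i 0
    if 1 ≤ next ∧ next ≤ N ∧ ¬ PySem.Set.contains used next then
      some (A ++ [next], PySem.Set.add used next)
    else none

def pvAInner (N : Int) (B : List Int) (first : Int) : Option (List Int × PySem.Set Int) :=
  (PySem.List.pyRange 0 (N - 1)).foldl (pvAStep N B)
    (some ([first], PySem.Set.ofList [first]))

def pvAOuter (N : Int) (B : List Int) : List Int → Option (List Int)
  | [] => none
  | first :: rest =>
    match pvAInner N B first with
    | some (A, _) => some A
    | none => pvAOuter N B rest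

def solve_photoshoot (N : Int) (B : List Int) : Option (List Int) :=
  pvAOuter N B (PySem.List.pyRange 1 (N + 1))

-- ===== PORT B =====
def pvBBuild (B : List Int) (p : List Int × List Int) (_k : Int) : List Int × List Int :=
  (p.1 ++ [PySem.List.pyGetD B (_k - 1) 0 - PySem.List.pyGetD p.1 (-1) 0],
   p.2 ++ [-(PySem.List.pyGetD p.2 (-1) 0)])

def pvBStep (N : Int) (c s : List Int) (f : Int)
    (st : Option (PySem.Set Int × List Int)) (k : Int) : Option (PySem.Set Int × List Int) :=
  match st with
  | none => none
  | some (seen, out) =>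
    let v := PySem.List.pyGetD c k 0 + PySem.List.pyGetD s k 0 * f
    if v < 1 ∨ v > N ∨ PySem.Set.contains seen v then none
    else some (PySem.Set.add seen v, out ++ [v])

def pvBCheck (N : Int) (c s : List Int) (f : Int) : Option (List Int) :=
  match (PySem.List.pyRange 0 N).foldl (pvBStep N c s f) (some (PySem.Set.empty, [])) with
  | some (_, out) => some out
  | none => none

def pvBOuter (N : Int) (c s : List Int) (sumC sumS sumSC sumC2 T1 T2 : Int) :
    List Int → Option (List Int)
  | [] => none
  | f :: rest =>
    if sumC + sumS * f ≠ T1 then pvBOuter N c s sumC sumS sumSC sumC2 T1 T2 rest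
    else if sumC2 + 2 * sumSC * f + N * f * f ≠ T2 then
      pvBOuter N c s sumC sumS sumSC sumC2 T1 T2 rest
    else
      match pvBCheck N c s f with
      | some out => some out
      | none => pvBOuter N c s sumC sumS sumSC sumC2 T1 T2 rest

def solve_photoshoot_alt (N : Int) (B : List Int) : Option (List Int) :=
  if N < 1 then none
  else
    let cs := (PySem.List.pyRange 1 N).foldl (pvBBuild B) ([0], [1])
    let c := cs.1
    let s := cs.2
    let sumC := c.sum
    let sumS := s.sum
    let sumSC := ((s.zip c).map (fun p => p.1 * p.2)).sum
    let sumC2 := (c.map (fun x => x * x)).sum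
    let T1 := PySem.Int.floordiv (N * (N + 1)) 2
    let T2 := PySem.Int.floordiv (N * (N + 1) * (2 * N + 1)) 6
    pvBOuter N c s sumC sumS sumSC sumC2 T1 T2 (PySem.List.pyRange 1 (N + 1))

-- ===== PRECONDITION & SPEC =====
-- Pre_ excludes exactly the inputs with len(B) < N - 1, on which Python A may hit B[i]
-- out of range and raise IndexError (and on which B's prefix precomputation raises too).
def Pre_solve_photoshoot (N : Int) (B : List Int) : Prop := N - 1 ≤ (B.length : Int)
instance (N : Int) (B : List Int) : Decidable (Pre_solve_photoshoot N B) := by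
  unfold Pre_solve_photoshoot; infer_instance

def pvWitness_solve_photoshoot : Int × List Int := (3, [3, 5])

def Spec_solve_photoshoot (N : Int) (B : List Int) (out : Option (List Int)) : Prop :=
  out = solve_photoshoot_alt N B
instance (N : Int) (B : List Int) (out : Option (List Int)) : Decidable (Spec_solve_photoshoot N B out) := by
  unfold Spec_solve_photoshoot; infer_instance

-- ===== CLAIM (what is proved, stated in full; the proofs are below) =====
def Claim_equal_solve_photoshoot : Prop := ∀ (N : Int) (B : List Int), Dom_solve_photoshoot N B → Pre_solve_photoshoot N B → Spec_solve_photoshoot N B (solve_photoshoot N B)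

-- ===== LEMMAS AND PROOFS =====

-- the value sequence A[0], A[1], … determined by the first value f
def pvV (B : List Int) (f : Int) : Nat → Int
  | 0 => f
  | k + 1 => B.getD k 0 - pvV B f k

-- the coefficients: pvV B f k = pvC B k + pvS k * f
def pvC (B : List Int) : Nat → Int
  | 0 => 0
  | k + 1 => B.getD k 0 - pvC B k

def pvS : Nat → Int
  | 0 => 1
  | k + 1 => -pvS k

lemma pvV_eq (B : List Int) (f : Int) (k : Nat) : pvV B f k = pvC B k + pvS k * f := by
  induction k with
  | zero => simp [pvV, pvC, pvS]
  | succ k ih => simp [pvV, pvC, pvS, ih]; ring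

lemma pvS_sq (k : Nat) : pvS k * pvS k = 1 := by
  induction k with
  | zero => simp [pvS]
  | succ k ih => simp [pvS, ih]

lemma foldl_none {α β : Type} (g : Option α → β → Option α) (h : ∀ x, g none x = none)
    (l : List β) : l.foldl g none = none := by
  induction l with
  | nil => rfl
  | cons x t ih => simp [List.foldl_cons, h, ih]

lemma pyRange_nil {a b : Int} (h : b ≤ a) : PySem.List.pyRange a b = [] := by
  simp [PySem.List.pyRange]; intro h1; omega

lemma pyGetD_neg_one {l : List Int} (h : l ≠ []) (d : Int) :
    PySem.List.pyGetD l (-1) d = l.getLast h := by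
  have hn : 0 < l.length := List.length_pos_iff.mpr h
  simp only [PySem.List.pyGetD, PySem.List.pyGet?, PySem.List.pyIdx?]
  rw [if_neg (by omega), if_pos (by omega)]
  simp only [Option.bind_some]
  rw [List.getLast_eq_getElem, List.getElem?_eq_getElem (by omega)]
  simp

lemma pyGetD_map_range (g : Nat → Int) (n k : Nat) (hk : k < n) (d : Int) :
    PySem.List.pyGetD ((List.range n).map g) (k : Int) d = g k := by
  rw [PySem.List.pyGetD_natCast]
  simp [List.getD, List.getElem?_map, List.getElem?_range hk]

lemma pyGetD_map_range_last (g : Nat → Int) (m : Nat) (hm : 1 ≤ m) (d : Int) :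
    PySem.List.pyGetD ((List.range m).map g) (-1) d = g (m - 1) := by
  have hne : (List.range m).map g ≠ [] := by simp; omega
  rw [pyGetD_neg_one hne]
  rw [List.getLast_eq_getElem]
  simp [List.getElem_map, List.getElem_range]

-- the c/s coefficient-building fold of port B
lemma buildStep (B : List Int) (M : Nat) (hM : 1 ≤ M) (x : Int) (hx : x = (M : Int)) :
    pvBBuild B ((List.range M).map (pvC B), (List.range M).map pvS) x
      = ((List.range (M + 1)).map (pvC B), (List.range (M + 1)).map pvS) := by
  simp only [pvBBuild, hx]
  rw [pyGetD_map_range_last _ M hM, pyGetD_map_range_last _ M hM]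
  rw [PySem.List.pyGetD_of_nonneg B 0 (by omega)]
  have h1 : ((M : Int) - 1).toNat = M - 1 := by omega
  rw [h1]
  have hc : B.getD (M - 1) 0 - pvC B (M - 1) = pvC B M := by
    cases M with
    | zero => omega
    | succ t => simp [pvC]
  have hs : -pvS (M - 1) = pvS M := by
    cases M with
    | zero => omega
    | succ t => simp [pvS]
  rw [hc, hs, List.range_succ]
  simp

lemma csMain (B : List Int) : ∀ j : Nat,
    (List.range j).foldl (fun p (k : Nat) => pvBBuild B p ((1 : Int) + 1 * (k : Int)))
        (([0], [1]) : List Int × List Int)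
      = ((List.range (1 + j)).map (pvC B), (List.range (1 + j)).map pvS) := by
  intro j
  induction j with
  | zero => simp [pvC, pvS]
  | succ j ih =>
    rw [List.range_succ, List.foldl_append, ih]
    simp only [List.foldl_cons, List.foldl_nil]
    rw [buildStep B (1 + j) (by omega) _ (by push_cast; ring)]
    congr 2

lemma cs_of_fold (N : Int) (B : List Int) (hN : 1 ≤ N) :
    (PySem.List.pyRange 1 N).foldl (pvBBuild B) ([0], [1])
      = ((List.range N.toNat).map (pvC B), (List.range N.toNat).map pvS) := by
  have hcount : PySem.List.pyRange 1 N
      = (List.range (N - 1).toNat).map (fun (k : Nat) => (1 : Int) + 1 * (k : Int)) := by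
    simp only [PySem.List.pyRange]
    rw [if_neg (by norm_num)]
    by_cases h : (1 : Int) < N
    · rw [if_pos (by norm_num), if_pos h]
      have he : (N - 1 + 1 - 1) / 1 = N - 1 := by omega
      rw [he]
    · rw [if_pos (by norm_num), if_neg h]
      have : (N - 1).toNat = 0 := by omega
      simp [this]
  rw [hcount, List.foldl_map]
  rw [csMain B ((N - 1).toNat)]
  have h2 : 1 + (N - 1).toNat = N.toNat := by omega
  rw [h2]

lemma stepA_none (N : Int) (B : List Int) (x : Int) : pvAStep N B none x = none := rfl
lemma stepB_none (N : Int) (c s : List Int) (f x : Int) : pvBStep N c s f none x = none := rfl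

lemma inner_eq (N : Int) (B : List Int) (f : Int) :
    ∀ (j i : Nat) (acc : List Int), (i : Int) + 1 + (j : Int) = N →
    acc = (List.range (i + 1)).map (pvV B f) → acc.Nodup → (∀ x ∈ acc, 1 ≤ x ∧ x ≤ N) →
    ((PySem.List.pyRange (i : Int) (N - 1)).foldl (pvAStep N B) (some (acc, acc))
        = (PySem.List.pyRange ((i : Int) + 1) N).foldl
            (pvBStep N ((List.range N.toNat).map (pvC B)) ((List.range N.toNat).map pvS) f)
            (some (acc, acc)))
    ∧ (∀ st, (PySem.List.pyRange (i : Int) (N - 1)).foldl (pvAStep N B) (some (acc, acc)) = some st →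
        st.1 = (List.range N.toNat).map (pvV B f) ∧ st.2 = st.1 ∧ st.1.Nodup ∧
        ∀ x ∈ st.1, 1 ≤ x ∧ x ≤ N) := by
  intro j
  induction j with
  | zero =>
    intro i acc hsum hacc hnd hbd
    rw [pyRange_nil (by omega : N - 1 ≤ (i : Int)), pyRange_nil (by omega : N ≤ (i : Int) + 1)]
    refine ⟨rfl, ?_⟩
    intro st hst
    obtain rfl : (acc, acc) = st := by simpa using hst
    have hi : i + 1 = N.toNat := by omega
    exact ⟨by simp only [← hi]; rw [hacc], rfl, hnd, hbd⟩
  | succ j ih =>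
    intro i acc hsum hacc hnd hbd
    have hin : i + 1 < N.toNat := by omega
    rw [PySem.List.pyRange_one_cons (by omega : (i : Int) < N - 1),
        PySem.List.pyRange_one_cons (by omega : (i : Int) + 1 < N)]
    simp only [List.foldl_cons]
    -- evaluate the two step functions
    have hgetB : PySem.List.pyGetD B (i : Int) 0 = B.getD i 0 := by
      rw [PySem.List.pyGetD_of_nonneg B 0 (by omega)]
      simp
    have hgetA : PySem.List.pyGetD acc (i : Int) 0 = pvV B f i := by
      rw [hacc, pyGetD_map_range _ _ _ (by omega)]
    have hstepA : pvAStep N B (some (acc, acc)) (i : Int)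
        = if 1 ≤ pvV B f (i + 1) ∧ pvV B f (i + 1) ≤ N ∧ ¬ PySem.Set.contains acc (pvV B f (i + 1))
          then some (acc ++ [pvV B f (i + 1)], PySem.Set.add acc (pvV B f (i + 1)))
          else none := by
      simp only [pvAStep, hgetB, hgetA]
      have : B.getD i 0 - pvV B f i = pvV B f (i + 1) := by simp [pvV]
      rw [this]
    have hcast : ((i : Int) + 1) = ((i + 1 : Nat) : Int) := by push_cast; ring
    have hstepB : pvBStep N ((List.range N.toNat).map (pvC B)) ((List.range N.toNat).map pvS) f
          (some (acc, acc)) ((i : Int) + 1)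
        = if pvV B f (i + 1) < 1 ∨ pvV B f (i + 1) > N ∨ PySem.Set.contains acc (pvV B f (i + 1))
          then none
          else some (PySem.Set.add acc (pvV B f (i + 1)), acc ++ [pvV B f (i + 1)]) := by
      simp only [pvBStep, hcast]
      rw [pyGetD_map_range _ _ _ hin, pyGetD_map_range _ _ _ hin]
      rw [← pvV_eq]
    by_cases hc : 1 ≤ pvV B f (i + 1) ∧ pvV B f (i + 1) ≤ N ∧ ¬ PySem.Set.contains acc (pvV B f (i + 1))
    · -- step succeeds on both sides
      have hnotmem : pvV B f (i + 1) ∉ acc := by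
        have := hc.2.2
        simpa [PySem.Set.contains] using this
      have hadd : PySem.Set.add acc (pvV B f (i + 1)) = acc ++ [pvV B f (i + 1)] := by
        simp only [PySem.Set.add, PySem.Set.contains]
        rw [if_neg (by simpa using hnotmem)]
      rw [hstepA, if_pos hc, hstepB, if_neg (by rintro (h | h | h) <;> [omega; omega; exact hc.2.2 h])]
      rw [hadd]
      have hacc' : acc ++ [pvV B f (i + 1)] = (List.range (i + 1 + 1)).map (pvV B f) := by
        rw [List.range_succ, List.map_append, ← hacc]; rfl
      have hnd' : (acc ++ [pvV B f (i + 1)]).Nodup := by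
        simp only [List.nodup_append, hnd, List.nodup_singleton, true_and]
        intro a ha b hb
        simp only [List.mem_singleton] at hb
        subst hb
        exact fun he => hnotmem (he ▸ ha)
      have hbd' : ∀ x ∈ acc ++ [pvV B f (i + 1)], 1 ≤ x ∧ x ≤ N := by
        intro x hx
        rcases List.mem_append.mp hx with h | h
        · exact hbd x h
        · simp at h; subst h; exact ⟨hc.1, hc.2.1⟩
      have ihh := ih (i + 1) (acc ++ [pvV B f (i + 1)])
        (by push_cast at hsum ⊢; omega) hacc' hnd' hbd'
      obtain ⟨heq, hspec⟩ := ihh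
      push_cast at heq hspec
      exact ⟨heq, hspec⟩
    · -- step fails on both sides
      rw [hstepA, if_neg hc, hstepB, if_pos ?hcond]
      case hcond =>
        by_cases h1 : 1 ≤ pvV B f (i + 1)
        · by_cases h2 : pvV B f (i + 1) ≤ N
          · right; right
            by_cases h3 : PySem.Set.contains acc (pvV B f (i + 1))
            · exact h3
            · exact absurd ⟨h1, h2, h3⟩ hc
          · right; left; omega
        · left; omega
      rw [foldl_none _ (stepA_none N B), foldl_none _ (stepB_none N _ _ f)]
      exact ⟨rfl, by intro st hst; cases hst⟩

lemma inner_main (N : Int) (B : List Int) (f : Int) (hN : 1 ≤ N) (hf1 : 1 ≤ f) (hf2 : f ≤ N) :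
    (pvAInner N B f = none ∧
      pvBCheck N ((List.range N.toNat).map (pvC B)) ((List.range N.toNat).map pvS) f = none) ∨
    (∃ l, pvAInner N B f = some (l, l) ∧
      pvBCheck N ((List.range N.toNat).map (pvC B)) ((List.range N.toNat).map pvS) f = some l ∧
      l = (List.range N.toNat).map (pvV B f) ∧ l.Nodup ∧ ∀ x ∈ l, 1 ≤ x ∧ x ≤ N) := by
  have hn1 : 1 ≤ N.toNat := by omega
  have hof : PySem.Set.ofList [f] = [f] := rfl
  have hstep0 : pvBStep N ((List.range N.toNat).map (pvC B)) ((List.range N.toNat).map pvS) f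
      (some (PySem.Set.empty, [])) 0
      = some ([f], [f]) := by
    simp only [pvBStep]
    rw [show (0 : Int) = ((0 : Nat) : Int) by norm_num]
    rw [pyGetD_map_range _ _ _ (by omega), pyGetD_map_range _ _ _ (by omega)]
    simp only [pvC, pvS, PySem.Set.empty]
    rw [if_neg (by rintro (h | h | h) <;> first | omega | simp [PySem.Set.contains] at h)]
    simp [PySem.Set.add, PySem.Set.contains]
  have hmain := inner_eq N B f (N.toNat - 1) 0 [f] (by push_cast; omega)
    (by simp [pvV]) (List.nodup_singleton f) (by intro x hx; simp at hx; subst hx; exact ⟨hf1, hf2⟩)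
  rw [show ((0 : Nat) : Int) = (0 : Int) by norm_num] at hmain
  obtain ⟨heq, hspec⟩ := hmain
  have hBfold : (PySem.List.pyRange 0 N).foldl
        (pvBStep N ((List.range N.toNat).map (pvC B)) ((List.range N.toNat).map pvS) f)
        (some (PySem.Set.empty, []))
      = (PySem.List.pyRange (0 + 1) N).foldl
        (pvBStep N ((List.range N.toNat).map (pvC B)) ((List.range N.toNat).map pvS) f)
        (some ([f], [f])) := by
    rw [PySem.List.pyRange_one_cons (by omega : (0 : Int) < N)]
    simp only [List.foldl_cons, hstep0]
  unfold pvAInner pvBCheck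
  rw [hof, hBfold, ← heq]
  cases hres : (PySem.List.pyRange 0 (N - 1)).foldl (pvAStep N B) (some ([f], [f])) with
  | none => exact Or.inl ⟨rfl, rfl⟩
  | some st =>
    obtain ⟨h1, h2, h3, h4⟩ := hspec st hres
    right
    obtain ⟨sa, sb⟩ := st
    simp only at h1 h2 h3 h4
    subst h2
    exact ⟨sb, rfl, rfl, h1, h3, h4⟩

lemma toFinset_eq (N : Int) (l : List Int) (hlen : l.length = N.toNat) (hnd : l.Nodup)
    (hmem : ∀ x ∈ l, 1 ≤ x ∧ x ≤ N) : l.toFinset = Finset.Icc 1 N := by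
  apply Finset.eq_of_subset_of_card_le
  · intro x hx
    rw [List.mem_toFinset] at hx
    exact Finset.mem_Icc.mpr (hmem x hx)
  · rw [Int.card_Icc, List.card_toFinset, hnd.dedup, hlen]
    omega

lemma sum_Icc_top (n : Int) (h : 0 ≤ n) (f : Int → Int) :
    ∑ x ∈ Finset.Icc 1 (n+1), f x = (∑ x ∈ Finset.Icc 1 n, f x) + f (n+1) := by
  have hins : Finset.Icc (1:Int) (n+1) = insert (n+1) (Finset.Icc 1 n) := by
    ext x; simp [Finset.mem_Icc, Finset.mem_insert]; omega
  rw [hins, Finset.sum_insert (by simp [Finset.mem_Icc])]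
  ring

lemma gauss1 (N : Int) (hN : 0 ≤ N) : (∑ x ∈ Finset.Icc (1 : Int) N, x) * 2 = N * (N + 1) := by
  induction N, hN using Int.le_induction with
  | base => simp
  | succ n hn ih =>
    rw [sum_Icc_top n hn]
    linear_combination ih

lemma gauss2 (N : Int) (hN : 0 ≤ N) :
    (∑ x ∈ Finset.Icc (1 : Int) N, x * x) * 6 = N * (N + 1) * (2 * N + 1) := by
  induction N, hN using Int.le_induction with
  | base => simp
  | succ n hn ih =>
    rw [sum_Icc_top n hn]
    linear_combination ih

lemma perm_sum (N : Int) (hN : 1 ≤ N) (l : List Int) (hlen : l.length = N.toNat)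
    (hnd : l.Nodup) (hmem : ∀ x ∈ l, 1 ≤ x ∧ x ≤ N) :
    l.sum = PySem.Int.floordiv (N * (N + 1)) 2 ∧
    (l.map (fun x => x * x)).sum = PySem.Int.floordiv (N * (N + 1) * (2 * N + 1)) 6 := by
  have hfin := toFinset_eq N l hlen hnd hmem
  have hsum : l.sum = ∑ x ∈ Finset.Icc (1 : Int) N, x := by
    rw [← hfin, List.sum_toFinset _ hnd, List.map_id']
  have hsq : (l.map (fun x => x * x)).sum = ∑ x ∈ Finset.Icc (1 : Int) N, x * x := by
    rw [← hfin, List.sum_toFinset _ hnd]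
  constructor
  · have h1 := gauss1 N (by omega)
    rw [PySem.Int.floordiv_eq_ediv_of_pos (by norm_num), hsum]
    omega
  · have h2 := gauss2 N (by omega)
    rw [PySem.Int.floordiv_eq_ediv_of_pos (by norm_num), hsq]
    generalize hM : N * (N + 1) * (2 * N + 1) = M at *
    omega

lemma sum_map_affine (R : List Nat) (g h : Nat → Int) (f : Int) :
    (R.map (fun k => g k + h k * f)).sum = (R.map g).sum + (R.map h).sum * f := by
  induction R with
  | nil => simp
  | cons a t ih => simp only [List.map_cons, List.sum_cons, ih]; ring

lemma sum_map_sq (R : List Nat) (g h : Nat → Int) (f : Int) (hsq : ∀ k, h k * h k = 1) :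
    (R.map (fun k => (g k + h k * f) * (g k + h k * f))).sum
      = (R.map (fun k => g k * g k)).sum + 2 * (R.map (fun k => h k * g k)).sum * f
        + (R.length : Int) * f * f := by
  induction R with
  | nil => simp
  | cons a t ih =>
    simp only [List.map_cons, List.sum_cons, ih, List.length_cons]
    push_cast
    linear_combination f * f * hsq a

lemma filters_pass (N : Int) (B : List Int) (f : Int) (hN : 1 ≤ N)
    (l : List Int) (hl : l = (List.range N.toNat).map (pvV B f)) (hnd : l.Nodup)
    (hmem : ∀ x ∈ l, 1 ≤ x ∧ x ≤ N) :
    ((List.range N.toNat).map (pvC B)).sum + ((List.range N.toNat).map pvS).sum * f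
        = PySem.Int.floordiv (N * (N + 1)) 2 ∧
    (((List.range N.toNat).map (pvC B)).map (fun x => x * x)).sum
        + 2 * ((((List.range N.toNat).map pvS).zip ((List.range N.toNat).map (pvC B))).map
            (fun p => p.1 * p.2)).sum * f + N * f * f
        = PySem.Int.floordiv (N * (N + 1) * (2 * N + 1)) 6 := by
  have hlen : l.length = N.toNat := by rw [hl]; simp
  obtain ⟨hs1, hs2⟩ := perm_sum N hN l hlen hnd hmem
  have hVsum : l.sum = ((List.range N.toNat).map (pvC B)).sum + ((List.range N.toNat).map pvS).sum * f := by
    rw [hl]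
    have : (List.range N.toNat).map (pvV B f) = (List.range N.toNat).map (fun k => pvC B k + pvS k * f) := by
      apply List.map_congr_left; intro k _; exact pvV_eq B f k
    rw [this, sum_map_affine]
  have hzip : (((List.range N.toNat).map pvS).zip ((List.range N.toNat).map (pvC B))).map
      (fun p => p.1 * p.2) = (List.range N.toNat).map (fun k => pvS k * pvC B k) := by
    rw [List.zip_map', List.map_map]
    rfl
  have hVsq : (l.map (fun x => x * x)).sum
      = (((List.range N.toNat).map (pvC B)).map (fun x => x * x)).sum
        + 2 * ((List.range N.toNat).map (fun k => pvS k * pvC B k)).sum * f + N * f * f := by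
    rw [hl, List.map_map, List.map_map]
    have h1 : ((fun x => x * x) ∘ pvV B f) = fun k => (pvC B k + pvS k * f) * (pvC B k + pvS k * f) := by
      funext k; simp [Function.comp, pvV_eq]
    rw [h1, sum_map_sq _ _ _ _ pvS_sq]
    have h2 : ((List.range N.toNat).length : Int) = N := by simp; omega
    rw [h2]
    rfl
  refine ⟨by rw [← hVsum, hs1], ?_⟩
  rw [hzip, ← hVsq, hs2]

lemma outer_eq (N : Int) (B : List Int) (hN : 1 ≤ N) :
    ∀ L : List Int, (∀ f ∈ L, 1 ≤ f ∧ f ≤ N) →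
    pvAOuter N B L = pvBOuter N ((List.range N.toNat).map (pvC B)) ((List.range N.toNat).map pvS)
      ((List.range N.toNat).map (pvC B)).sum ((List.range N.toNat).map pvS).sum
      ((((List.range N.toNat).map pvS).zip ((List.range N.toNat).map (pvC B))).map
        (fun p => p.1 * p.2)).sum
      (((List.range N.toNat).map (pvC B)).map (fun x => x * x)).sum
      (PySem.Int.floordiv (N * (N + 1)) 2) (PySem.Int.floordiv (N * (N + 1) * (2 * N + 1)) 6) L := by
  intro L
  induction L with
  | nil => intro _; rfl
  | cons f rest ih =>
    intro hf
    have hmem := hf f (List.mem_cons_self ..)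
    have htail : ∀ g ∈ rest, 1 ≤ g ∧ g ≤ N := fun g hg => hf g (List.mem_cons_of_mem _ hg)
    rcases inner_main N B f hN hmem.1 hmem.2 with ⟨ha, hb⟩ | ⟨l, ha, hb, hl, hnd, hbd⟩
    · simp only [pvAOuter, pvBOuter, ha, hb]
      split_ifs <;> exact ih htail
    · obtain ⟨hF1, hF2⟩ := filters_pass N B f hN l hl hnd hbd
      simp only [pvAOuter, pvBOuter, ha, hb]
      rw [if_neg (show ¬_ from fun h => h hF1), if_neg (show ¬_ from fun h => h hF2)]

-- ===== VERDICT (by name: the statement is the Claim_ definition above) =====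
theorem solve_photoshoot_spec : Claim_equal_solve_photoshoot := by
  intro N B _hDom _hPre
  unfold Spec_solve_photoshoot solve_photoshoot solve_photoshoot_alt
  by_cases hN : N < 1
  · simp only [hN, if_true]
    rw [pyRange_nil (by omega)]
    rfl
  · simp only [if_neg hN]
    replace hN : 1 ≤ N := by omega
    rw [cs_of_fold N B hN]
    exact outer_eq N B hN _ (fun f hf => by
      rcases PySem.List.mem_pyRange_one.mp hf with ⟨h1, h2⟩; exact ⟨h1, by omega⟩)
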